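-- pv_equiv track=rewrite | github.com/Skiti/Etrojans | binary-tools/binary-diff.py | confronta_file_binari
-- ===== SOURCE A (Python) =====
-- def confronta_file_binari(file1, file2):
--     len_file1 = len(file1)
--     len_file2 = len(file2)
--     len_min = min(len_file1, len_file2)
--
--     differenze = []
--
--     for i in range(len_min):
--         byte1 = file1[i]
--         byte2 = file2[i]
--         if byte1 != byte2:
--             differenze.append((i, byte1, byte2))
--
--     if len_file1 > len_file2:
--         for i in range(len_min, len_file1):
--             differenze.append((i, file1[i], None))
--     elif len_file2 > len_file1:
--         for i in range(len_min, len_file2):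
--             differenze.append((i, None, file2[i]))
--
--     return differenze
-- ===== SOURCE B (Python) =====
-- def confronta_file_binari(file1, file2):
--     n = max(len(file1), len(file2))
--     padded = [(file1[i] if i < len(file1) else None,
--                file2[i] if i < len(file2) else None) for i in range(n)]
--     return [(i, a, b) for i, (a, b) in enumerate(padded) if a != b]
-- ===== Notes on version B (the rewrite author's own statement) =====
-- stated objective: idiomatic
-- what changed: A's three loops (common prefix plus one of two trailing loops chosen by a length comparison) are merged into a single None-padded zip-longest pass over one index range, filtered by a comprehension.
import Mathlib
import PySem

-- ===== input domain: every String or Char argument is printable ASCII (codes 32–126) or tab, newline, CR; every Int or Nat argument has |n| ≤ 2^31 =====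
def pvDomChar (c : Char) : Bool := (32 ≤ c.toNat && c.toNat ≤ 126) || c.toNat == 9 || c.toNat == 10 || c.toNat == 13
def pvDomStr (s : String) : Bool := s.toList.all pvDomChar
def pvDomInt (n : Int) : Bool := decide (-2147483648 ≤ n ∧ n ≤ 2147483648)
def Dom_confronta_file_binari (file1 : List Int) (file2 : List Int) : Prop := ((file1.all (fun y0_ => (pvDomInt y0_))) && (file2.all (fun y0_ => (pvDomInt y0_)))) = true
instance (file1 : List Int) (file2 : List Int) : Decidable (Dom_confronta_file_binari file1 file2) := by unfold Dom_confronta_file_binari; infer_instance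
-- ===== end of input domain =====

-- B merges A's three loops (common prefix + one of two trailing loops) into a single
-- None-padded zip-longest pass filtered by a comprehension (objective: idiomatic).

-- ===== PORT A =====
def confronta_file_binari (file1 : List Int) (file2 : List Int) : List (Int × Option Int × Option Int) :=
  let len_file1 : Int := PySem.List.len file1
  let len_file2 : Int := PySem.List.len file2
  let len_min : Int := min len_file1 len_file2
  let differenze : List (Int × Option Int × Option Int) :=
    (PySem.List.pyRange 0 len_min 1).foldl (fun acc i =>
      let byte1 := PySem.List.pyGetD file1 i 0    -- file1[i]; i is always in range here
      let byte2 := PySem.List.pyGetD file2 i 0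
      if byte1 ≠ byte2 then acc ++ [(i, some byte1, some byte2)] else acc) []
  if len_file1 > len_file2 then
    (PySem.List.pyRange len_min len_file1 1).foldl (fun acc i =>
      acc ++ [(i, some (PySem.List.pyGetD file1 i 0), none)]) differenze
  else if len_file2 > len_file1 then
    (PySem.List.pyRange len_min len_file2 1).foldl (fun acc i =>
      acc ++ [(i, none, some (PySem.List.pyGetD file2 i 0))]) differenze
  else differenze

-- ===== PORT B =====
def confronta_file_binari_alt (file1 : List Int) (file2 : List Int) : List (Int × Option Int × Option Int) :=
  let n : Int := max (PySem.List.len file1) (PySem.List.len file2)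
  let padded : List (Option Int × Option Int) :=
    (PySem.List.pyRange 0 n 1).map (fun i =>
      ((if i < PySem.List.len file1 then some (PySem.List.pyGetD file1 i 0) else none),
       (if i < PySem.List.len file2 then some (PySem.List.pyGetD file2 i 0) else none)))
  (PySem.List.enumerate padded 0).filterMap (fun p =>
    if p.2.1 ≠ p.2.2 then some (p.1, p.2.1, p.2.2) else none)

-- ===== PRECONDITION & SPEC =====
def Spec_confronta_file_binari (file1 : List Int) (file2 : List Int) (out : List (Int × Option Int × Option Int)) : Prop := out = confronta_file_binari_alt file1 file2
instance (file1 : List Int) (file2 : List Int) (out : List (Int × Option Int × Option Int)) : Decidable (Spec_confronta_file_binari file1 file2 out) := by unfold Spec_confronta_file_binari; infer_instance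

-- ===== CLAIM (what is proved, stated in full; the proofs are below) =====
def Claim_equal_confronta_file_binari : Prop := ∀ (file1 : List Int) (file2 : List Int), Dom_confronta_file_binari file1 file2 → Spec_confronta_file_binari file1 file2 (confronta_file_binari file1 file2)

-- ===== LEMMAS AND PROOFS =====

/-- the None-padded lookup both programs implicitly compute at index `i` -/
def pvOpt (xs : List Int) (i : Int) : Option Int :=
  if i < PySem.List.len xs then some (PySem.List.pyGetD xs i 0) else none

/-- the per-index difference record both programs emit at index `i` -/
def pvG (xs ys : List Int) (i : Int) : Option (Int × Option Int × Option Int) :=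
  if pvOpt xs i ≠ pvOpt ys i then some (i, pvOpt xs i, pvOpt ys i) else none

theorem pvB_eq (xs ys : List Int) :
    confronta_file_binari_alt xs ys
      = (PySem.List.pyRange 0 (max (PySem.List.len xs) (PySem.List.len ys)) 1).filterMap (pvG xs ys) := by
  simp only [confronta_file_binari_alt]
  rw [PySem.List.enumerate_eq_map_pyRange _ ((none : Option Int), (none : Option Int))]
  rw [List.filterMap_map]
  have hlen : PySem.List.len ((PySem.List.pyRange 0 (max (PySem.List.len xs) (PySem.List.len ys)) 1).map
      (fun i => ((if i < PySem.List.len xs then some (PySem.List.pyGetD xs i 0) else none),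
       (if i < PySem.List.len ys then some (PySem.List.pyGetD ys i 0) else none))))
      = max (PySem.List.len xs) (PySem.List.len ys) := by
    simp [PySem.List.len_eq, PySem.List.length_pyRange_one]
  rw [hlen]
  apply List.filterMap_congr
  intro j hj
  rw [PySem.List.mem_pyRange_one] at hj
  simp only [Function.comp]
  rw [PySem.List.pyGetD_map_pyRange_of_nonneg _ _ _ _ hj.1 hj.2]
  simp [pvG, pvOpt]

/-- `filter`-then-`map` as a single `filterMap` (the shape A's common-prefix loop reduces to) -/
theorem pvFilterMapOfFilterMap {α β : Type} (p : α → Prop) [DecidablePred p] (f : α → β) (l : List α) :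
    (l.filter (fun x => decide (p x))).map f = l.filterMap (fun x => if p x then some (f x) else none) := by
  induction l with
  | nil => simp
  | cons a t ih => by_cases h : p a <;> simp [h, ih]

theorem pvCommon_eq (xs ys : List Int) :
    ((PySem.List.pyRange 0 (min (PySem.List.len xs) (PySem.List.len ys)) 1).foldl (fun acc i =>
      if PySem.List.pyGetD xs i 0 ≠ PySem.List.pyGetD ys i 0 then
        acc ++ [(i, some (PySem.List.pyGetD xs i 0), some (PySem.List.pyGetD ys i 0))] else acc) [])
    = (PySem.List.pyRange 0 (min (PySem.List.len xs) (PySem.List.len ys)) 1).filterMap (pvG xs ys) := by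
  rw [PySem.List.foldl_append_ite
        (p := fun i => PySem.List.pyGetD xs i 0 ≠ PySem.List.pyGetD ys i 0)
        (f := fun i => ((i : Int), some (PySem.List.pyGetD xs i 0), some (PySem.List.pyGetD ys i 0)))]
  rw [List.nil_append, pvFilterMapOfFilterMap]
  apply List.filterMap_congr
  intro i hi
  rw [PySem.List.mem_pyRange_one] at hi
  have h1 : i < PySem.List.len xs := lt_of_lt_of_le hi.2 (min_le_left _ _)
  have h2 : i < PySem.List.len ys := lt_of_lt_of_le hi.2 (min_le_right _ _)
  simp only [PySem.List.len_eq] at h1 h2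
  simp [pvG, pvOpt, h1, h2]

theorem pvA_eq (xs ys : List Int) :
    confronta_file_binari xs ys
      = (PySem.List.pyRange 0 (max (PySem.List.len xs) (PySem.List.len ys)) 1).filterMap (pvG xs ys) := by
  simp only [confronta_file_binari]
  split_ifs with h1 h2
  · -- len xs > len ys: common loop then the file1 trailing loop
    rw [PySem.List.foldl_append_singleton_eq_map, pvCommon_eq,
        min_eq_right (le_of_lt h1), max_eq_left (le_of_lt h1),
        PySem.List.pyRange_one_append 0 (PySem.List.len ys) (PySem.List.len xs)
          (by simp [PySem.List.len_eq]) (le_of_lt h1),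
        List.filterMap_append]
    congr 1
    rw [Eq.comm, List.filterMap_eq_map_iff_forall_eq_some]
    intro i hi
    rw [PySem.List.mem_pyRange_one] at hi
    have hx : i < PySem.List.len xs := hi.2
    have hy : ¬ i < PySem.List.len ys := not_lt.mpr hi.1
    simp only [PySem.List.len_eq] at hx hy
    simp [pvG, pvOpt, hx, hy]
  · -- len ys > len xs: common loop then the file2 trailing loop
    rw [PySem.List.foldl_append_singleton_eq_map, pvCommon_eq,
        min_eq_left (le_of_lt h2), max_eq_right (le_of_lt h2),
        PySem.List.pyRange_one_append 0 (PySem.List.len xs) (PySem.List.len ys)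
          (by simp [PySem.List.len_eq]) (le_of_lt h2),
        List.filterMap_append]
    congr 1
    rw [Eq.comm, List.filterMap_eq_map_iff_forall_eq_some]
    intro i hi
    rw [PySem.List.mem_pyRange_one] at hi
    have hy : i < PySem.List.len ys := hi.2
    have hx : ¬ i < PySem.List.len xs := not_lt.mpr hi.1
    simp only [PySem.List.len_eq] at hx hy
    simp [pvG, pvOpt, hx, hy]
  · -- equal lengths: only the common loop
    have he : PySem.List.len xs = PySem.List.len ys := le_antisymm (not_lt.mp h1) (not_lt.mp h2)
    rw [pvCommon_eq, he, min_self, max_self]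

-- ===== VERDICT (by name: the statement is the Claim_ definition above) =====
theorem confronta_file_binari_spec : Claim_equal_confronta_file_binari := by
  intro file1 file2 _
  unfold Spec_confronta_file_binari
  rw [pvA_eq, pvB_eq]
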